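-- pv_equiv track=rewrite | github.com/AbhijeetNandvikar/advent-of-code-2025 | day-3/index.py | get_max_joltage_puzzle_1
-- ===== SOURCE A (Python) =====
-- def get_max_joltage_puzzle_1(value):
--     max_num = -1
--     max_num_index = -1
--     second_max_num = -1
--     num_count = len(value)
--     for index in range(len(value)):
--         current_num = int(value[index])
--
--         if current_num > max_num and index <= num_count - 2:
--             max_num = current_num
--             max_num_index = index
--             second_max_num = -1
--         if current_num > second_max_num and index > max_num_index:
--             second_max_num = current_num
--
--     return int(f"{max_num}{second_max_num}")
-- ===== SOURCE B (Python) =====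
-- def get_max_joltage_puzzle_1(value):
--     nums = [int(v) for v in value]
--     if len(nums) >= 2:
--         max_num = max(nums[:-1])
--         idx = nums.index(max_num)
--     else:
--         max_num, idx = -1, -1
--     tail = nums[idx + 1:]
--     second_max_num = max(tail) if tail else -1
--     return int(f"{max_num}{second_max_num}")
-- ===== Notes on version B (the rewrite author's own statement) =====
-- stated objective: simpler
-- what changed: Replaces A's fused single pass with intertwined max/index/second-max state by two independent slice-based passes: max of nums[:-1] with its first-occurrence index, then max of nums[idx+1:]. Pre_ restricts to the natural domain (nonempty list of nonnegative integer strings): on the empty list A raises ValueError, and lists with negative entries are an unspecified corner where A raises on some and, on the rest, A and B each return a different but equally defensible concatenation of signed numbers.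
-- outside the precondition, e.g. on get_max_joltage_puzzle_1(['-3', '5']): A returns -15, B returns -35; on get_max_joltage_puzzle_1(['5', '-2']): A raises ValueError, B raises ValueError; on get_max_joltage_puzzle_1([]): A raises ValueError, B raises ValueError
import Mathlib
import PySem

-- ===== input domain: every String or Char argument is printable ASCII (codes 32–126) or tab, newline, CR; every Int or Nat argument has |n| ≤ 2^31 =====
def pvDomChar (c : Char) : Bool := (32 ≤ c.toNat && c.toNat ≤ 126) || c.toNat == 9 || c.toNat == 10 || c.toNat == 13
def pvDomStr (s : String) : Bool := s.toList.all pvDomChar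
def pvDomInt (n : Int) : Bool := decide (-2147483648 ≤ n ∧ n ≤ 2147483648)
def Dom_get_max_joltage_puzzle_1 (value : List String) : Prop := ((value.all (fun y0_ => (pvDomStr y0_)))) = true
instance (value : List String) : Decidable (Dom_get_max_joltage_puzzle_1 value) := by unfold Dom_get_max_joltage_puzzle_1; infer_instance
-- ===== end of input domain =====

-- B replaces A's fused single pass (intertwined max/index/second-max state) by two separate slice-based max passes; same O(n) cost, plainer code.


-- ===== PORT A =====
-- literal transliteration of A: one fold over range(len(value)) carrying (max_num, max_num_index, second_max_num)
def get_max_joltage_puzzle_1 (value : List String) : Int :=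
  let num_count : Int := value.length
  let st : Int × Int × Int :=
    (PySem.List.pyRange 0 (value.length : Int) 1).foldl
      (fun (st : Int × Int × Int) index =>
        let max_num := st.1
        let max_num_index := st.2.1
        let second_max_num := st.2.2
        -- int(value[index]); getD 0 is unreachable inside Pre_ (index in range, string parses)
        let current_num : Int := ((PySem.List.pyGet? value index).bind PySem.Int.ofStr?).getD 0
        let st2 : Int × Int × Int :=
          if current_num > max_num ∧ index ≤ num_count - 2 then (current_num, index, -1)
          else (max_num, max_num_index, second_max_num)
        if current_num > st2.2.2 ∧ index > st2.2.1 then (st2.1, st2.2.1, current_num)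
        else st2)
      (-1, -1, -1)
  (PySem.Int.ofStr? (PySem.Int.toStr st.1 ++ PySem.Int.toStr st.2.2)).getD 0

-- ===== PORT B =====
-- transliteration of Source B: nums, then max of nums[:-1] with its first index, then max of nums[idx+1:]
def get_max_joltage_puzzle_1_alt (value : List String) : Int :=
  let nums : List Int := value.map (fun v => (PySem.Int.ofStr? v).getD 0)
  let mi : Int × Int :=
    if 2 ≤ nums.length then
      let m := (PySem.List.max? (PySem.List.slice nums none (some (-1))) (fun x => x)).getD 0
      (m, (((PySem.List.index? nums m).getD 0 : Nat) : Int))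
    else (-1, -1)
  let tail := PySem.List.slice nums (some (mi.2 + 1)) none
  let second_max_num : Int := if tail ≠ [] then (PySem.List.max? tail (fun x => x)).getD 0 else -1
  (PySem.Int.ofStr? (PySem.Int.toStr mi.1 ++ PySem.Int.toStr second_max_num)).getD 0

-- ===== PRECONDITION & SPEC =====
-- Pre_ = the natural domain: a nonempty list of strings each parsing (via int()) to a NONNEGATIVE integer.
-- It excludes the empty list (A raises ValueError) and lists with a negative entry: an unspecified corner
-- on which A raises for some inputs and, on the rest, A and B each return a different but equally
-- defensible concatenation of signed numbers.
def Pre_get_max_joltage_puzzle_1 (value : List String) : Prop :=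
  value ≠ [] ∧ ∀ s ∈ value, (PySem.Int.ofStr? s).any (fun n => decide (0 ≤ n)) = true
instance (value : List String) : Decidable (Pre_get_max_joltage_puzzle_1 value) := by
  unfold Pre_get_max_joltage_puzzle_1; infer_instance

def pvWitness_get_max_joltage_puzzle_1 : List String := ["3", "12", "7"]

def Spec_get_max_joltage_puzzle_1 (value : List String) (out : Int) : Prop := out = get_max_joltage_puzzle_1_alt value
instance (value : List String) (out : Int) : Decidable (Spec_get_max_joltage_puzzle_1 value out) := by unfold Spec_get_max_joltage_puzzle_1; infer_instance

-- ===== CLAIM (what is proved, stated in full; the proofs are below) =====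
def Claim_equal_get_max_joltage_puzzle_1 : Prop := ∀ (value : List String), Dom_get_max_joltage_puzzle_1 value → Pre_get_max_joltage_puzzle_1 value → Spec_get_max_joltage_puzzle_1 value (get_max_joltage_puzzle_1 value)

-- ===== LEMMAS AND PROOFS =====



-- A's loop body as a named function (definitionally the lambda in the port)
def pvBody (value : List String) (st : Int × Int × Int) (index : Int) : Int × Int × Int :=
  let current_num : Int := ((PySem.List.pyGet? value index).bind PySem.Int.ofStr?).getD 0
  let st2 : Int × Int × Int :=
    if current_num > st.1 ∧ index ≤ (value.length : Int) - 2 then (current_num, index, -1)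
    else st
  if current_num > st2.2.2 ∧ index > st2.2.1 then (st2.1, st2.2.1, current_num) else st2

-- running max of the first p elements, with -1 as Python's initial sentinel
def pvM (nums : List Int) (p : Nat) : Int := (nums.take p).foldl max (-1)
-- A's max_num_index after the first p prefix elements were considered
def pvI (nums : List Int) (p : Nat) : Int :=
  if p = 0 then -1 else (((PySem.List.index? nums (pvM nums p)).getD 0 : Nat) : Int)
-- canonical description of A's loop state after the first k iterations
def pvStA (nums : List Int) (n k : Nat) : Int × Int × Int :=
  (pvM nums (min k (n-1)), pvI nums (min k (n-1)),
   ((nums.take k).drop (pvI nums (min k (n-1)) + 1).toNat).foldl max (-1))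

theorem pvPortA_eq (value : List String) : get_max_joltage_puzzle_1 value =
    (PySem.Int.ofStr? (PySem.Int.toStr ((PySem.List.pyRange 0 (value.length : Int) 1).foldl (pvBody value) (-1, -1, -1)).1 ++
      PySem.Int.toStr ((PySem.List.pyRange 0 (value.length : Int) 1).foldl (pvBody value) (-1, -1, -1)).2.2)).getD 0 := rfl

theorem pvMaxBridge (l : List Int) (hne : l ≠ []) (h0 : ∀ x ∈ l, 0 ≤ x) :
    (PySem.List.max? l (fun x => x)).getD 0 = l.foldl max (-1) := by
  cases l with
  | nil => exact absurd rfl hne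
  | cons h t =>
    rw [PySem.List.max?_id_cons]
    have h0h : 0 ≤ h := h0 h List.mem_cons_self
    have hm : max (-1) h = h := max_eq_right (by omega)
    simp only [Option.getD_some, List.foldl_cons, hm]

theorem pvM_mem (nums : List Int) (hnn : ∀ x ∈ nums, 0 ≤ x) (p : Nat) (hp : 1 ≤ p) (hne : nums ≠ []) :
    pvM nums p ∈ nums.take p ∧ 0 ≤ pvM nums p := by
  rcases List.exists_cons_of_ne_nil hne with ⟨h, t, rfl⟩
  rcases Nat.exists_eq_add_of_le hp with ⟨q, rfl⟩
  have h0h : 0 ≤ h := hnn h List.mem_cons_self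
  have hmax : max (-1) h = h := max_eq_right (by omega)
  unfold pvM
  rw [show 1 + q = q + 1 by omega]
  simp only [List.take_succ_cons, List.foldl_cons, hmax]
  rcases PySem.List.foldl_max_mem (t.take q) h with heq | hmem
  · rw [heq]; exact ⟨List.mem_cons_self, h0h⟩
  · refine ⟨List.mem_cons_of_mem _ hmem, ?_⟩
    have := (PySem.List.le_foldl_max (t.take q) h).1
    omega

theorem pvM_isMax (nums : List Int) (p : Nat) : ∀ y ∈ nums.take p, y ≤ pvM nums p := by
  intro y hy
  exact (PySem.List.le_foldl_max (nums.take p) (-1)).2 y hy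

theorem pvIdx_lt (nums : List Int) (v : Int) (p : Nat) (hv : v ∈ nums.take p) :
    ∃ j : Nat, PySem.List.index? nums v = some j ∧ j < p := by
  have hvmem : v ∈ nums := List.mem_of_mem_take hv
  rcases Option.isSome_iff_exists.mp ((PySem.List.index?_isSome_iff nums v).mpr hvmem) with ⟨j, hj⟩
  refine ⟨j, hj, ?_⟩
  rcases PySem.List.getElem_of_index?_eq_some hj with ⟨hjlen, hje, hfirst⟩
  by_contra hge
  rw [Nat.not_lt] at hge
  rcases List.mem_take_iff_getElem.mp hv with ⟨l, hl, hle⟩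
  exact hfirst l (by omega) (by simp only [hle])

theorem pvS_step (nums : List Int) (k d : Nat) (hk : k < nums.length) (hd : d ≤ k) :
    ((nums.take (k+1)).drop d).foldl max (-1) = max (((nums.take k).drop d).foldl max (-1)) (nums[k]'hk) := by
  have htake : nums.take (k+1) = nums.take k ++ [nums[k]'hk] := by
    rw [List.take_add_one, List.getElem?_eq_getElem hk]; rfl
  have hdlen : d ≤ (nums.take k).length := by simp [List.length_take]; omega
  rw [htake, List.drop_append_of_le_length hdlen, List.foldl_append]
  simp

theorem pvCur_eq (value : List String) (nums : List Int)
    (hmap : nums = value.map (fun v => (PySem.Int.ofStr? v).getD 0)) (k : Nat) (hk : k < value.length) :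
    ((PySem.List.pyGet? value (k : Int)).bind PySem.Int.ofStr?).getD 0 =
      nums[k]'(by simp [hmap, hk]) := by
  subst hmap
  rw [PySem.List.pyGet?_natCast, List.getElem?_eq_getElem hk]
  simp

theorem pvStep (value : List String) (nums : List Int)
    (hmap : nums = value.map (fun v => (PySem.Int.ofStr? v).getD 0))
    (hnn : ∀ x ∈ nums, 0 ≤ x) (k : Nat) (hk : k < value.length) :
    pvBody value (pvStA nums value.length k) (k : Int) = pvStA nums value.length (k+1) := by
  have hlen : nums.length = value.length := by rw [hmap]; simp
  have hk' : k < nums.length := by omega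
  have hne : nums ≠ [] := by intro h; rw [h] at hk'; simp at hk'
  have hc0 : 0 ≤ nums[k]'hk' := hnn _ (List.getElem_mem hk')
  have hcur := pvCur_eq value nums hmap k hk
  have hMstep : pvM nums (k+1) = max (pvM nums k) (nums[k]'hk') := by
    have := pvS_step nums k 0 hk' (Nat.zero_le k)
    simpa [pvM] using this
  simp only [pvBody, pvStA, hcur]
  by_cases hlast : k + 1 ≤ value.length - 1
  · have hp : min k (value.length - 1) = k := by omega
    have hp1 : min (k+1) (value.length - 1) = k + 1 := by omega
    rw [hp, hp1]
    by_cases hcm : pvM nums k < nums[k]'hk'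
    · -- new maximum found at index k
      rw [if_pos (show (nums[k]'hk' > pvM nums k) ∧ (k : Int) ≤ (value.length : Int) - 2 from
        ⟨hcm, by omega⟩)]
      have hnotmem : nums[k]'hk' ∉ nums.take k := by
        intro hmem
        exact absurd (pvM_isMax nums k _ hmem) (by omega)
      have hsplit : nums = nums.take k ++ nums[k]'hk' :: nums.drop (k+1) := by
        conv_lhs => rw [← List.take_append_drop k nums]
        rw [List.drop_eq_getElem_cons hk']
      have hidx : PySem.List.index? nums (nums[k]'hk') = some k := by
        rw [PySem.List.index?_eq_some_iff]
        exact ⟨nums.take k, nums.drop (k+1), hsplit, by simp [List.length_take]; omega, hnotmem⟩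
      have hMk1 : pvM nums (k+1) = nums[k]'hk' := by
        rw [hMstep]; exact max_eq_right (by omega)
      have hI : pvI nums (k+1) = (k : Int) := by
        unfold pvI
        rw [if_neg (by omega), hMk1, hidx]
        simp
      rw [if_neg (by simp)]
      rw [hMk1, hI, show ((k : Int) + 1).toNat = k + 1 by omega,
        List.drop_eq_nil_of_le (by simp [List.length_take])]
      rfl
    · -- current ≤ running max: only the second-max may change
      have hp0 : ¬ k = 0 := by
        intro h0
        have hM0 : pvM nums k = -1 := by rw [h0]; simp [pvM]
        exact hcm (by omega)
      have hMmem := pvM_mem nums hnn k (by omega) hne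
      obtain ⟨j, hj, hjlt⟩ := pvIdx_lt nums (pvM nums k) k hMmem.1
      have hIk : pvI nums k = (j : Int) := by unfold pvI; rw [if_neg hp0, hj]; simp
      have hMk1 : pvM nums (k+1) = pvM nums k := by
        rw [hMstep]; exact max_eq_left (by omega)
      have hIk1 : pvI nums (k+1) = (j : Int) := by
        unfold pvI
        rw [if_neg (by omega), hMk1]
        unfold pvI at hIk
        rw [if_neg hp0] at hIk
        exact hIk
      rw [if_neg (show ¬((nums[k]'hk' > pvM nums k) ∧ (k : Int) ≤ (value.length : Int) - 2) from
        fun h => absurd h.1 hcm)]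
      rw [hIk, hMk1, hIk1]
      have hSstep : ((nums.take (k+1)).drop (((j : Int) + 1).toNat)).foldl max (-1) =
          max (((nums.take k).drop (((j : Int) + 1).toNat)).foldl max (-1)) (nums[k]'hk') := by
        rw [show ((j : Int) + 1).toNat = j + 1 by omega]
        exact pvS_step nums k (j+1) hk' (by omega)
      rw [hSstep]
      by_cases hcs : nums[k]'hk' > ((nums.take k).drop (((j : Int) + 1).toNat)).foldl max (-1)
      · rw [if_pos (show _ ∧ ((k : Int) > (j : Int)) from ⟨hcs, by exact_mod_cast hjlt⟩)]
        rw [max_eq_right (le_of_lt hcs)]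
      · rw [if_neg (fun h => absurd h.1 hcs), max_eq_left (by omega)]
  · -- last index: the max is frozen, only the second-max may change
    have hp : min k (value.length - 1) = k := by omega
    have hp1 : min (k+1) (value.length - 1) = k := by omega
    rw [hp, hp1]
    rw [if_neg (show ¬((nums[k]'hk' > pvM nums k) ∧ (k : Int) ≤ (value.length : Int) - 2) from
      fun h => by have := h.2; omega)]
    by_cases hp0 : k = 0
    · -- the one-element list: sentinel max, second-max becomes the only element
      subst hp0
      have hI0 : pvI nums 0 = -1 := by simp [pvI]
      simp only [List.take_zero, List.drop_nil, List.foldl_nil, hI0]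
      rw [if_pos (show (nums[(0:Nat)]'hk' > (-1:Int)) ∧ (((0:Nat):Int) > (-1:Int)) from
        ⟨by omega, by omega⟩)]
      have htake : nums.take 1 = [nums[(0:Nat)]'hk'] := by
        rw [show (1:Nat) = 0 + 1 from rfl, List.take_add_one, List.getElem?_eq_getElem hk']
        rfl
      simp [htake]
      omega
    · have hMmem := pvM_mem nums hnn k (by omega) hne
      obtain ⟨j, hj, hjlt⟩ := pvIdx_lt nums (pvM nums k) k hMmem.1
      have hIk : pvI nums k = (j : Int) := by unfold pvI; rw [if_neg hp0, hj]; simp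
      rw [hIk]
      have hSstep : ((nums.take (k+1)).drop (((j : Int) + 1).toNat)).foldl max (-1) =
          max (((nums.take k).drop (((j : Int) + 1).toNat)).foldl max (-1)) (nums[k]'hk') := by
        rw [show ((j : Int) + 1).toNat = j + 1 by omega]
        exact pvS_step nums k (j+1) hk' (by omega)
      rw [hSstep]
      by_cases hcs : nums[k]'hk' > ((nums.take k).drop (((j : Int) + 1).toNat)).foldl max (-1)
      · rw [if_pos (show _ ∧ ((k : Int) > (j : Int)) from ⟨hcs, by exact_mod_cast hjlt⟩)]
        rw [max_eq_right (le_of_lt hcs)]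
      · rw [if_neg (fun h => absurd h.1 hcs), max_eq_left (by omega)]

theorem pvLoop (value : List String) (nums : List Int)
    (hmap : nums = value.map (fun v => (PySem.Int.ofStr? v).getD 0))
    (hnn : ∀ x ∈ nums, 0 ≤ x) (k : Nat) (hk : k ≤ value.length) :
    (PySem.List.pyRange 0 (k : Int) 1).foldl (pvBody value) (-1, -1, -1) = pvStA nums value.length k := by
  induction k with
  | zero =>
    rw [show ((0:Nat):Int) = 0 from rfl, PySem.List.pyRange_one_eq_nil (le_refl 0)]
    simp [pvStA, pvM, pvI]
  | succ k ih =>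
    rw [show ((k+1 : Nat) : Int) = (k : Int) + 1 by push_cast; ring,
      PySem.List.pyRange_one_succ_right (by omega : (0:Int) ≤ (k:Int)),
      List.foldl_append, ih (by omega)]
    simp only [List.foldl_cons, List.foldl_nil]
    exact pvStep value nums hmap hnn k (by omega)

-- B's two passes as named functions (definitionally the port of B)
def pvBmi (nums : List Int) : Int × Int :=
  if 2 ≤ nums.length then
    ((PySem.List.max? (PySem.List.slice nums none (some (-1))) (fun x => x)).getD 0,
     (((PySem.List.index? nums
          ((PySem.List.max? (PySem.List.slice nums none (some (-1))) (fun x => x)).getD 0)).getD 0 : Nat) : Int))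
  else (-1, -1)

def pvBsec (nums : List Int) : Int :=
  if PySem.List.slice nums (some ((pvBmi nums).2 + 1)) none ≠ [] then
    (PySem.List.max? (PySem.List.slice nums (some ((pvBmi nums).2 + 1)) none) (fun x => x)).getD 0
  else -1

theorem pvPortB_eq (value : List String) : get_max_joltage_puzzle_1_alt value =
    (PySem.Int.ofStr? (PySem.Int.toStr (pvBmi (value.map (fun v => (PySem.Int.ofStr? v).getD 0))).1 ++
      PySem.Int.toStr (pvBsec (value.map (fun v => (PySem.Int.ofStr? v).getD 0))))).getD 0 := rfl

theorem pvBmatch (nums : List Int) (hnn : ∀ x ∈ nums, 0 ≤ x) (hne : nums ≠ []) :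
    (pvBmi nums).1 = (pvStA nums nums.length nums.length).1 ∧
    pvBsec nums = (pvStA nums nums.length nums.length).2.2 := by
  have hn1 : 1 ≤ nums.length := by
    cases nums with
    | nil => exact absurd rfl hne
    | cons h t => simp
  by_cases h2 : 2 ≤ nums.length
  · have hp : min nums.length (nums.length - 1) = nums.length - 1 := by omega
    have hdl : PySem.List.slice nums none (some (-1)) = nums.take (nums.length - 1) := by
      rw [PySem.List.slice_to_neg_one, List.dropLast_eq_take]
    have htne : nums.take (nums.length - 1) ≠ [] := by
      intro h
      have := congrArg List.length h
      simp [List.length_take] at this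
      omega
    have hM : (PySem.List.max? (PySem.List.slice nums none (some (-1))) (fun x => x)).getD 0 =
        pvM nums (nums.length - 1) := by
      rw [hdl]
      exact pvMaxBridge _ htne (fun x hx => hnn x (List.mem_of_mem_take hx))
    have hmi : pvBmi nums = (pvM nums (nums.length - 1), pvI nums (nums.length - 1)) := by
      unfold pvBmi pvI
      rw [if_pos h2, if_neg (by omega), hM]
    obtain ⟨hMmem, hM0⟩ := pvM_mem nums hnn (nums.length - 1) (by omega) hne
    obtain ⟨j, hj, hjlt⟩ := pvIdx_lt nums _ _ hMmem
    have hIeq : pvI nums (nums.length - 1) = (j : Int) := by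
      unfold pvI
      rw [if_neg (by omega), hj]
      simp
    constructor
    · rw [hmi]
      simp only [pvStA]
      rw [hp]
    · unfold pvBsec
      rw [hmi, hIeq]
      have hslice : PySem.List.slice nums (some ((j : Int) + 1)) none = nums.drop (j+1) := by
        rw [PySem.List.slice_from nums (by omega),
          show ((j : Int) + 1).toNat = j + 1 by omega]
      rw [hslice]
      have hdne : nums.drop (j+1) ≠ [] := by
        intro h
        rw [List.drop_eq_nil_iff] at h
        omega
      rw [if_pos hdne, pvMaxBridge _ hdne (fun x hx => hnn x (List.mem_of_mem_drop hx))]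
      simp only [pvStA]
      rw [hp, hIeq, show ((j : Int) + 1).toNat = j + 1 by omega, List.take_length]
  · have hmi : pvBmi nums = (-1, -1) := by unfold pvBmi; rw [if_neg h2]
    constructor
    · rw [hmi]
      simp only [pvStA]
      rw [show min nums.length (nums.length - 1) = 0 by omega]
      simp [pvM]
    · unfold pvBsec
      rw [hmi]
      have hslice : PySem.List.slice nums (some ((-1 : Int) + 1)) none = nums := by
        rw [PySem.List.slice_from nums (by omega)]
        simp
      rw [hslice, if_pos hne, pvMaxBridge _ hne hnn]
      simp only [pvStA]
      rw [show min nums.length (nums.length - 1) = 0 by omega,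
        show pvI nums 0 = -1 from by simp [pvI],
        show ((-1 : Int) + 1).toNat = 0 by decide, List.drop_zero, List.take_length]

theorem get_max_joltage_puzzle_1_spec : Claim_equal_get_max_joltage_puzzle_1 := by
  intro value hdom hpre
  unfold Spec_get_max_joltage_puzzle_1
  obtain ⟨hne, hall⟩ := hpre
  have hnn : ∀ x ∈ value.map (fun v => (PySem.Int.ofStr? v).getD 0), 0 ≤ x := by
    intro x hx
    rcases List.mem_map.mp hx with ⟨s, hs, rfl⟩
    have h := hall s hs
    cases hh : PySem.Int.ofStr? s with
    | none => rw [hh] at h; simp [Option.any] at h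
    | some n =>
      rw [hh] at h
      simp [Option.any] at h
      simpa [hh] using h
  have hlenne : value.map (fun v => (PySem.Int.ofStr? v).getD 0) ≠ [] := by simpa using hne
  have hlen : (value.map (fun v => (PySem.Int.ofStr? v).getD 0)).length = value.length := by simp
  obtain ⟨h1, h2⟩ := pvBmatch (value.map (fun v => (PySem.Int.ofStr? v).getD 0)) hnn hlenne
  rw [hlen] at h1 h2
  rw [pvPortA_eq, pvPortB_eq, pvLoop value _ rfl hnn value.length (le_refl _), h1, h2]
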